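-- pv_equiv track=rewrite | github.com/MLjungg/LoopTheLoop | Board.py | board_maker
-- ===== SOURCE A (Python) =====
-- def board_maker(size):
--     board = [[0] * size for i in range(size)]
--     # board[1][0] = 1
--
--
--     # SmallSquare = 2
--     # Bigsqure = o, a, b, c
--
--     board[1][3] = 3
--     board[1][5] = 3
--     board[1][7] = 3
--     board[3][1] = 2
--     board[3][3] = 2
--     board[3][5] = 6
--     board[3][7] = 2
--     board[3][9] = 2
--     board[5][9] = 2
--     board[7][1] = 2
--     board[7][3] = 5
--     board[7][7] = 5
--     board[7][9] = 2
--     board[9][7] = 2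
--     board[0][1] = 1
--     board[0][5] = 1
--     board[0][9] = 1
--     board[1][0] = 1
--     board[1][2] = 1
--     board[1][4] = 1
--     board[1][6] = 1
--     board[1][8] = 1
--     board[1][10] = 1
--     board[2][3] = 1
--     board[2][7] = 1
--     board[3][0] = 1
--     board[3][10] = 1
--     board[4][1] = 1
--     board[4][3] = 1
--     board[4][7] = 1
--     board[4][9] = 1
--     board[5][4] = 1
--     board[5][6] = 1
--     board[6][1] = 1
--     board[6][3] = 1
--     board[6][7] = 1
--     board[6][9] = 1
--     board[7][0] = 1
--     board[7][10] = 1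
--     board[8][5] = 1
--     board[9][0] = 1
--     board[9][4] = 1
--     board[9][6] = 1
--     board[9][10] = 1
--     board[10][1] = 1
--     board[10][3] = 1
--     board[10][7] = 1
--     board[10][9] = 1
--     return board
-- ===== SOURCE B (Python) =====
-- # The completed 11x11 picture is stored as a constant template grid and stamped
-- # onto the top-left corner of a zero board by one nested loop over its coordinates.
-- _TEMPLATE = (
--     (0, 1, 0, 0, 0, 1, 0, 0, 0, 1, 0),
--     (1, 0, 1, 3, 1, 3, 1, 3, 1, 0, 1),
--     (0, 0, 0, 1, 0, 0, 0, 1, 0, 0, 0),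
--     (1, 2, 0, 2, 0, 6, 0, 2, 0, 2, 1),
--     (0, 1, 0, 1, 0, 0, 0, 1, 0, 1, 0),
--     (0, 0, 0, 0, 1, 0, 1, 0, 0, 2, 0),
--     (0, 1, 0, 1, 0, 0, 0, 1, 0, 1, 0),
--     (1, 2, 0, 5, 0, 0, 0, 5, 0, 2, 1),
--     (0, 0, 0, 0, 0, 1, 0, 0, 0, 0, 0),
--     (1, 0, 0, 0, 1, 0, 1, 2, 0, 0, 1),
--     (0, 1, 0, 1, 0, 0, 0, 1, 0, 1, 0),
-- )
--
-- def board_maker(size):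
--     board = [[0] * size for _ in range(size)]
--     for r in range(11):
--         for c in range(11):
--             board[r][c] = _TEMPLATE[r][c]
--     return board
-- ===== Notes on version B (the rewrite author's own statement) =====
-- stated objective: simpler
-- what changed: Instead of encoding the puzzle as 48 individual hardcoded board[r][c]=v statements, B stores the finished 11x11 picture as one constant template grid and stamps it onto the top-left corner of the zero board with a single nested loop over the template's coordinates.
import Mathlib
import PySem

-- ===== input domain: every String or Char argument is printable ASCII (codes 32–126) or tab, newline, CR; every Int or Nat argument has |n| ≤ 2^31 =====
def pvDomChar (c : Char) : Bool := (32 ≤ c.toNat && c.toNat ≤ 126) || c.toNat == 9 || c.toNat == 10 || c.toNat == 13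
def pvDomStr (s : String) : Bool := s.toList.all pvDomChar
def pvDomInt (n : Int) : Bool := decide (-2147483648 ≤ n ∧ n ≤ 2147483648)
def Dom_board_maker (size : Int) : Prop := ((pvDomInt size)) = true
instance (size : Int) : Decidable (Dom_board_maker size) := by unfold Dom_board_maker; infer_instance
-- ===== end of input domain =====

-- B replaces the 48 hardcoded board[r][c]=v statements by a constant 11x11 template grid
-- stamped onto the top-left corner of the zero board by one nested loop; objective: simpler.

-- ===== PORT A =====
-- board[r][c] = v (in-range under Pre_; List.set/getD are no-ops out of range)
def pvSetCell (b : List (List Int)) (r c : Nat) (v : Int) : List (List Int) :=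
  b.set r ((b.getD r []).set c v)

def board_maker (size : Int) : List (List Int) :=
  let board := (List.range size.toNat).map (fun _ => List.replicate size.toNat (0 : Int))
  let board := pvSetCell board 1 3 3
  let board := pvSetCell board 1 5 3
  let board := pvSetCell board 1 7 3
  let board := pvSetCell board 3 1 2
  let board := pvSetCell board 3 3 2
  let board := pvSetCell board 3 5 6
  let board := pvSetCell board 3 7 2
  let board := pvSetCell board 3 9 2
  let board := pvSetCell board 5 9 2
  let board := pvSetCell board 7 1 2
  let board := pvSetCell board 7 3 5
  let board := pvSetCell board 7 7 5
  let board := pvSetCell board 7 9 2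
  let board := pvSetCell board 9 7 2
  let board := pvSetCell board 0 1 1
  let board := pvSetCell board 0 5 1
  let board := pvSetCell board 0 9 1
  let board := pvSetCell board 1 0 1
  let board := pvSetCell board 1 2 1
  let board := pvSetCell board 1 4 1
  let board := pvSetCell board 1 6 1
  let board := pvSetCell board 1 8 1
  let board := pvSetCell board 1 10 1
  let board := pvSetCell board 2 3 1
  let board := pvSetCell board 2 7 1
  let board := pvSetCell board 3 0 1
  let board := pvSetCell board 3 10 1
  let board := pvSetCell board 4 1 1
  let board := pvSetCell board 4 3 1
  let board := pvSetCell board 4 7 1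
  let board := pvSetCell board 4 9 1
  let board := pvSetCell board 5 4 1
  let board := pvSetCell board 5 6 1
  let board := pvSetCell board 6 1 1
  let board := pvSetCell board 6 3 1
  let board := pvSetCell board 6 7 1
  let board := pvSetCell board 6 9 1
  let board := pvSetCell board 7 0 1
  let board := pvSetCell board 7 10 1
  let board := pvSetCell board 8 5 1
  let board := pvSetCell board 9 0 1
  let board := pvSetCell board 9 4 1
  let board := pvSetCell board 9 6 1
  let board := pvSetCell board 9 10 1
  let board := pvSetCell board 10 1 1
  let board := pvSetCell board 10 3 1
  let board := pvSetCell board 10 7 1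
  let board := pvSetCell board 10 9 1
  board

-- ===== PORT B =====
def pvTemplate : List (List Int) :=
  [[0, 1, 0, 0, 0, 1, 0, 0, 0, 1, 0],
   [1, 0, 1, 3, 1, 3, 1, 3, 1, 0, 1],
   [0, 0, 0, 1, 0, 0, 0, 1, 0, 0, 0],
   [1, 2, 0, 2, 0, 6, 0, 2, 0, 2, 1],
   [0, 1, 0, 1, 0, 0, 0, 1, 0, 1, 0],
   [0, 0, 0, 0, 1, 0, 1, 0, 0, 2, 0],
   [0, 1, 0, 1, 0, 0, 0, 1, 0, 1, 0],
   [1, 2, 0, 5, 0, 0, 0, 5, 0, 2, 1],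
   [0, 0, 0, 0, 0, 1, 0, 0, 0, 0, 0],
   [1, 0, 0, 0, 1, 0, 1, 2, 0, 0, 1],
   [0, 1, 0, 1, 0, 0, 0, 1, 0, 1, 0]]

def board_maker_alt (size : Int) : List (List Int) :=
  let board := (List.range size.toNat).map (fun _ => List.replicate size.toNat (0 : Int))
  (List.range 11).foldl (fun b r =>
    (List.range 11).foldl (fun b c =>
      pvSetCell b r c ((pvTemplate.getD r []).getD c 0)) b) board

-- ===== PRECONDITION & SPEC =====
-- Python A raises IndexError for size ≤ 10 (it assigns up to board[10][9]); exactly those inputs are excluded.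
def Pre_board_maker (size : Int) : Prop := 11 ≤ size
instance (size : Int) : Decidable (Pre_board_maker size) := by unfold Pre_board_maker; infer_instance
def pvWitness_board_maker : Int := (11)

def Spec_board_maker (size : Int) (out : List (List Int)) : Prop := out = board_maker_alt size
instance (size : Int) (out : List (List Int)) : Decidable (Spec_board_maker size out) := by unfold Spec_board_maker; infer_instance

-- ===== CLAIM =====
def Claim_equal_board_maker : Prop := ∀ (size : Int), Dom_board_maker size → Pre_board_maker size → Spec_board_maker size (board_maker size)

-- ===== LEMMAS AND PROOFS =====

def pvGen (n : Nat) (g : Nat → Nat → Int) : List (List Int) :=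
  (List.range n).map (fun r => (List.range n).map (fun c => g r c))

def pvUpd (g : Nat → Nat → Int) (r c : Nat) (v : Int) : Nat → Nat → Int :=
  fun a b => if a = r ∧ b = c then v else g a b

-- the function computed by A's chain of assignments, innermost first
def pvGA : Nat → Nat → Int :=
  (pvUpd (pvUpd (pvUpd (pvUpd (pvUpd (pvUpd (pvUpd (pvUpd (pvUpd (pvUpd (pvUpd (pvUpd (pvUpd (pvUpd (pvUpd (pvUpd (pvUpd (pvUpd (pvUpd (pvUpd (pvUpd (pvUpd (pvUpd (pvUpd (pvUpd (pvUpd (pvUpd (pvUpd (pvUpd (pvUpd (pvUpd (pvUpd (pvUpd (pvUpd (pvUpd (pvUpd (pvUpd (pvUpd (pvUpd (pvUpd (pvUpd (pvUpd (pvUpd (pvUpd (pvUpd (pvUpd (pvUpd (pvUpd (fun _ _ => (0 : Int)) 1 3 3) 1 5 3) 1 7 3) 3 1 2) 3 3 2) 3 5 6) 3 7 2) 3 9 2) 5 9 2) 7 1 2) 7 3 5) 7 7 5) 7 9 2) 9 7 2) 0 1 1) 0 5 1) 0 9 1) 1 0 1) 1 2 1) 1 4 1) 1 6 1) 1 8 1)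 1 10 1) 2 3 1) 2 7 1) 3 0 1) 3 10 1) 4 1 1) 4 3 1) 4 7 1) 4 9 1) 5 4 1) 5 6 1) 6 1 1) 6 3 1) 6 7 1) 6 9 1) 7 0 1) 7 10 1) 8 5 1) 9 0 1) 9 4 1) 9 6 1) 9 10 1) 10 1 1) 10 3 1) 10 7 1) 10 9 1)

-- the function computed by B's template stamp
def pvGBfold : Nat → Nat → Int :=
  (List.range 11).foldl (fun h r =>
    (List.range 11).foldl (fun h c =>
      pvUpd h r c ((pvTemplate.getD r []).getD c 0)) h) (fun _ _ => (0 : Int))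

-- both equal this cell-value function
def pvGB : Nat → Nat → Int :=
  fun r c => if r < 11 ∧ c < 11 then (pvTemplate.getD r []).getD c 0 else 0

lemma pvSet_gen (n : Nat) (g : Nat → Nat → Int) (r c : Nat) (v : Int) :
    pvSetCell (pvGen n g) r c v = pvGen n (pvUpd g r c v) := by
  unfold pvSetCell pvGen pvUpd
  apply List.ext_getElem
  · simp
  · intro i h1 h2
    by_cases hrn : r < n
    · have hget : (((List.range n).map (fun r' => (List.range n).map (fun c' => g r' c'))).getD r []) = (List.range n).map (fun c' => g r c') := by
        rw [List.getD_eq_getElem?_getD]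
        simp [hrn]
      simp only [hget]
      simp only [List.getElem_set, List.getElem_map, List.getElem_range]
      by_cases hir : r = i
      · subst hir
        rw [if_pos rfl]
        apply List.ext_getElem
        · simp
        · intro j hj1 hj2
          simp only [List.getElem_set, List.getElem_map, List.getElem_range]
          by_cases hjc : c = j
          · simp [hjc]
          · rw [if_neg hjc]
            have : ¬(j = c) := fun hh => hjc hh.symm
            rw [if_neg (by simp [this])]
      · rw [if_neg hir]
        apply List.ext_getElem
        · simp
        · intro j hj1 hj2
          simp only [List.getElem_map, List.getElem_range]
          have : ¬(i = r ∧ j = c) := fun hh => hir hh.1.symm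
          rw [if_neg this]
    · have hset : (((List.range n).map (fun r' => (List.range n).map (fun c' => g r' c'))).set r ((((List.range n).map (fun r' => (List.range n).map (fun c' => g r' c'))).getD r []).set c v)) = ((List.range n).map (fun r' => (List.range n).map (fun c' => g r' c'))) := by
        apply List.set_eq_of_length_le
        simpa using Nat.le_of_not_lt hrn
      simp only [hset]
      simp only [List.getElem_map, List.getElem_range]
      apply List.ext_getElem
      · simp
      · intro j hj1 hj2
        simp only [List.getElem_map, List.getElem_range]
        have hin : i < n := by simpa using h1
        have : ¬(i = r ∧ j = c) := fun hh => hrn (hh.1 ▸ hin)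
        rw [if_neg this]

lemma pvBase_gen (n : Nat) :
    (List.range n).map (fun _ => List.replicate n (0 : Int)) = pvGen n (fun _ _ => (0 : Int)) := by
  unfold pvGen
  apply List.map_congr_left
  intro r _
  apply List.ext_getElem <;> simp

lemma pvA_gen (size : Int) : board_maker size = pvGen size.toNat pvGA := by
  simp only [board_maker, pvBase_gen, pvSet_gen]
  rfl

lemma pvInner_fold_gen (L : List Nat) (r : Nat) (f : Nat → Int) (n : Nat) (g : Nat → Nat → Int) :
    L.foldl (fun b c => pvSetCell b r c (f c)) (pvGen n g)
      = pvGen n (L.foldl (fun h c => pvUpd h r c (f c)) g) := by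
  induction L generalizing g with
  | nil => rfl
  | cons c L ih => simp only [List.foldl_cons, pvSet_gen, ih]

lemma pvOuter_fold_gen (L : List Nat) (f : Nat → Nat → Int) (n : Nat) (g : Nat → Nat → Int) :
    L.foldl (fun b r => (List.range 11).foldl (fun b c => pvSetCell b r c (f r c)) b) (pvGen n g)
      = pvGen n (L.foldl (fun h r => (List.range 11).foldl (fun h c => pvUpd h r c (f r c)) h) g) := by
  induction L generalizing g with
  | nil => rfl
  | cons r L ih => simp only [List.foldl_cons, pvInner_fold_gen, ih]

lemma pvB_gen (size : Int) : board_maker_alt size = pvGen size.toNat pvGBfold := by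
  simp only [board_maker_alt, pvBase_gen, pvOuter_fold_gen]
  rfl

lemma pvUpd_out {g : Nat → Nat → Int} {r c : Nat} {v : Int} (hr : r < 11) (hc : c < 11)
    (hg : ∀ a b, ¬(a < 11 ∧ b < 11) → g a b = 0) :
    ∀ a b, ¬(a < 11 ∧ b < 11) → pvUpd g r c v a b = 0 := by
  intro a b hab
  unfold pvUpd
  split_ifs with h
  · exact absurd ⟨h.1 ▸ hr, h.2 ▸ hc⟩ hab
  · exact hg a b hab

lemma pvGA_out : ∀ a b, ¬(a < 11 ∧ b < 11) → pvGA a b = 0 := by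
  unfold pvGA
  exact (pvUpd_out (by decide) (by decide) (pvUpd_out (by decide) (by decide) (pvUpd_out (by decide) (by decide) (pvUpd_out (by decide) (by decide) (pvUpd_out (by decide) (by decide) (pvUpd_out (by decide) (by decide) (pvUpd_out (by decide) (by decide) (pvUpd_out (by decide) (by decide) (pvUpd_out (by decide) (by decide) (pvUpd_out (by decide) (by decide) (pvUpd_out (by decide) (by decide) (pvUpd_out (by decide) (by decide) (pvUpd_out (by decide) (by decide) (pvUpd_out (by decide) (by decide) (pvUpd_out (by decide) (by decide) (pvUpd_out (by decide) (by decide) (pvUpd_out (by decide) (by decide) (pvUpd_out (by decide) (by decide) (pvUpd_out (by decide) (by decide) (pvUpd_out (by decide) (by decide) (pvUpd_out (by decide) (by decide) (pvUpd_out (by decide) (by decide) (pvUpd_out (by decide) (by decide) (pvUpd_out (by decide) (by decide) (pvUpd_out (by decide) (by decide) (pvUpd_out (by decide) (by decide) (pvUpd_out (by decide) (by decide) (pvUpd_out (by decide) (by decide) (pvUpd_out (by decide) (by decide) (pvUpd_out (by decide) (by decide) (pvUpd_out (by decide) (by decide) (pvUpd_out (by decide) (by decide) (pvUpd_out (by decide)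 (by decide) (pvUpd_out (by decide) (by decide) (pvUpd_out (by decide) (by decide) (pvUpd_out (by decide) (by decide) (pvUpd_out (by decide) (by decide) (pvUpd_out (by decide) (by decide) (pvUpd_out (by decide) (by decide) (pvUpd_out (by decide) (by decide) (pvUpd_out (by decide) (by decide) (pvUpd_out (by decide) (by decide) (pvUpd_out (by decide) (by decide) (pvUpd_out (by decide) (by decide) (pvUpd_out (by decide) (by decide) (pvUpd_out (by decide) (by decide) (pvUpd_out (by decide) (by decide) (pvUpd_out (by decide) (by decide) (fun _ _ _ => rfl)))))))))))))))))))))))))))))))))))))))))))))))))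

lemma pvInner_out (L : List Nat) (hL : ∀ c ∈ L, c < 11) (r : Nat) (hr : r < 11)
    (f : Nat → Int) (g : Nat → Nat → Int) (hg : ∀ a b, ¬(a < 11 ∧ b < 11) → g a b = 0) :
    ∀ a b, ¬(a < 11 ∧ b < 11) → (L.foldl (fun h c => pvUpd h r c (f c)) g) a b = 0 := by
  induction L generalizing g with
  | nil => exact hg
  | cons c L ih =>
    exact ih (fun x hx => hL x (List.mem_cons_of_mem _ hx)) _
      (pvUpd_out hr (hL c List.mem_cons_self) hg)

lemma pvOuter_out (L : List Nat) (hL : ∀ r ∈ L, r < 11)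
    (f : Nat → Nat → Int) (g : Nat → Nat → Int) (hg : ∀ a b, ¬(a < 11 ∧ b < 11) → g a b = 0) :
    ∀ a b, ¬(a < 11 ∧ b < 11) →
      (L.foldl (fun h r => (List.range 11).foldl (fun h c => pvUpd h r c (f r c)) h) g) a b = 0 := by
  induction L generalizing g with
  | nil => exact hg
  | cons r L ih =>
    exact ih (fun x hx => hL x (List.mem_cons_of_mem _ hx)) _
      (pvInner_out _ (fun c hc => List.mem_range.mp hc) r (hL r List.mem_cons_self) _ _ hg)

lemma pvGBfold_out : ∀ a b, ¬(a < 11 ∧ b < 11) → pvGBfold a b = 0 := by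
  unfold pvGBfold
  exact pvOuter_out _ (fun r hr => List.mem_range.mp hr) _ _ (fun _ _ _ => rfl)

lemma pvKeyA : ∀ r c, pvGA r c = pvGB r c := by
  intro r c
  by_cases h : r < 11 ∧ c < 11
  · obtain ⟨hr, hc⟩ := h
    interval_cases r <;> interval_cases c <;> decide
  · rw [pvGA_out r c h]
    simp only [pvGB, if_neg h]

lemma pvKeyB : ∀ r c, pvGBfold r c = pvGB r c := by
  intro r c
  by_cases h : r < 11 ∧ c < 11
  · obtain ⟨hr, hc⟩ := h
    interval_cases r <;> interval_cases c <;> decide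
  · rw [pvGBfold_out r c h]
    simp only [pvGB, if_neg h]

lemma pvGen_congr (n : Nat) (g h : Nat → Nat → Int) (H : ∀ a b, g a b = h a b) :
    pvGen n g = pvGen n h := by
  unfold pvGen
  simp only [H]

-- ===== VERDICT =====
theorem board_maker_spec : Claim_equal_board_maker := by
  intro size _ _
  unfold Spec_board_maker
  rw [pvA_gen, pvB_gen]
  exact pvGen_congr _ _ _ (fun a b => (pvKeyA a b).trans (pvKeyB a b).symm)
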